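-- pv_equiv track=rewrite | github.com/viktor-ferenczi/ai-ask-your-code-gpt | src/common/doc.py | find_common_base_dir
-- ===== SOURCE A (Python) =====
-- from typing import Iterator, Iterable, List
--
-- def find_common_base_dir(paths: List[str]) -> str:
--     if not paths:
--         return ''
--
--     if len(paths) == 1:
--         return '/'.join(paths[0].split('/')[:-1])
--
--     common_dirs = paths[0].split('/')[:-1]
--     common_dirs_len = len(common_dirs)
--
--     for path in paths[1:]:
--
--         split_path = path.split('/')[:-1]
--         for i, a, b in zip(range(common_dirs_len), common_dirs, split_path):
--             if a != b:
--                 del common_dirs[i:]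
--                 common_dirs_len = i
--                 break
--
--         split_path_len = len(split_path)
--         if split_path_len < common_dirs_len:
--             common_dirs = common_dirs[:split_path_len]
--             common_dirs_len = split_path_len
--
--         if not common_dirs_len:
--             break
--
--     return '/'.join(common_dirs)
-- ===== SOURCE B (Python) =====
-- def find_common_base_dir(paths):
--     splits = [p.split('/')[:-1] for p in paths]
--     result = []
--     for column in zip(*splits):
--         first = column[0]
--         if any(c != first for c in column):
--             break
--         result.append(first)
--     return '/'.join(result)
-- ===== Notes on version B (the rewrite author's own statement) =====
-- stated objective: simpler
-- what changed: A pairwise-folds each path into a mutable common-prefix list with a tracked length, an in-place del/truncate and two early breaks; B splits all paths once and scans the transposed directory components column-wise (zip(*splits)), keeping columns while all entries agree, which removes every special case.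
import Mathlib
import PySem

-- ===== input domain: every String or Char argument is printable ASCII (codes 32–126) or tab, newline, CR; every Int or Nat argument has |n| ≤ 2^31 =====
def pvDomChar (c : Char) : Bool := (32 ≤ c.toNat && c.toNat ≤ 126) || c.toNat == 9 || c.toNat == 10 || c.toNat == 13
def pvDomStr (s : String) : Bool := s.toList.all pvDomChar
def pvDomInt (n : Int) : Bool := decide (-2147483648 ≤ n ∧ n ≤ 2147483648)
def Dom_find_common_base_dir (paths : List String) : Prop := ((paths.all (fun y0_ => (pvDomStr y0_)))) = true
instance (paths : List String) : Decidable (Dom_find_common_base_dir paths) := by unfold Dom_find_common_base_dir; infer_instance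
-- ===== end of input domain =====

-- B replaces A's stateful loop (mutable common list, tracked length, del/truncate/break) by a
-- column-wise scan over the transposed directory components; objective: simpler decomposition.


-- ===== PORT A =====

-- p.split('/')[:-1]; the separator "/" is a non-empty literal, so split? is always `some`.
def splitDirs (p : String) : List String :=
  PySem.List.slice ((PySem.Str.split? p "/").getD []) none (some (-1))

-- A's inner `for i, a, b in zip(range(common_dirs_len), common_dirs, split_path)` with its break:
-- index of the first mismatching pair (range(len(common)) never truncates below zip of the two lists).
def firstMismatch : List String → List String → Option Nat
  | a :: cs, b :: ss => if a != b then some 0 else (firstMismatch cs ss).map (· + 1)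
  | _, _ => none

-- A's outer `for path in paths[1:]` with `del common_dirs[i:]`, the length truncation, and the break.
def aLoop : List String → List String → List String
  | common, [] => common
  | common, p :: ps =>
    let sp := splitDirs p
    let c1 := match firstMismatch common sp with
      | some i => List.take i common      -- del common_dirs[i:]
      | none => common
    let c2 := if sp.length < c1.length then List.take sp.length c1 else c1
    if c2.length = 0 then c2 else aLoop c2 ps

def find_common_base_dir (paths : List String) : String :=
  match paths with
  | [] => ""                                            -- if not paths
  | [p] => PySem.Str.join "/" (splitDirs p)             -- if len(paths) == 1
  | p :: rest => PySem.Str.join "/" (aLoop (splitDirs p) rest)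

-- ===== PORT B =====

-- zip(*splits): columns up to the shortest list (zip of no lists yields nothing).
def zipCols : List String → List (List String) → List (List String)
  | [], _ => []
  | a :: fs, rest =>
    if rest.any (·.isEmpty) then []
    else (a :: rest.map (·.headD "")) :: zipCols fs (rest.map (·.tail))

def pyZip : List (List String) → List (List String)
  | [] => []
  | first :: rest => zipCols first rest

-- the for-column loop: append column[0] while all entries equal it, break at the first mismatch.
def scanCols : List (List String) → List String
  | [] => []
  | col :: cols =>
    if col.any (· != col.headD "") then [] else col.headD "" :: scanCols cols

def find_common_base_dir_alt (paths : List String) : String :=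
  PySem.Str.join "/" (scanCols (pyZip (paths.map splitDirs)))

-- ===== PRECONDITION & SPEC =====
def Spec_find_common_base_dir (paths : List String) (out : String) : Prop := out = find_common_base_dir_alt paths
instance (paths : List String) (out : String) : Decidable (Spec_find_common_base_dir paths out) := by unfold Spec_find_common_base_dir; infer_instance

-- ===== CLAIM (what is proved, stated in full; the proofs are below) =====
def Claim_equal_find_common_base_dir : Prop := ∀ (paths : List String), Dom_find_common_base_dir paths → Spec_find_common_base_dir paths (find_common_base_dir paths)

-- ===== LEMMAS AND PROOFS =====

-- longest common prefix of two lists: the meet both programs compute pairwise / column-wise.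
def cp : List String → List String → List String
  | a :: cs, b :: ss => if a == b then a :: cp cs ss else []
  | _, _ => []

lemma cp_nil_left (sp : List String) : cp [] sp = [] := by cases sp <;> rfl

lemma cp_nil_right (c : List String) : cp c [] = [] := by cases c <;> rfl

-- A's per-path body (mismatch cut + length truncation) computes the common prefix.
lemma step_eq_cp : ∀ (c sp : List String),
    (let c1 := match firstMismatch c sp with
      | some i => List.take i c
      | none => c
     if sp.length < c1.length then List.take sp.length c1 else c1) = cp c sp := by
  intro c
  induction c with
  | nil =>
    intro sp
    simp only [firstMismatch, cp_nil_left]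
    simp
  | cons a cs ih =>
    intro sp
    cases sp with
    | nil => simp [firstMismatch, cp_nil_right]
    | cons b ss =>
      by_cases hab : a = b
      · subst hab
        have hfm : firstMismatch (a :: cs) (a :: ss) = (firstMismatch cs ss).map (· + 1) := by
          simp [firstMismatch]
        have ihss := ih ss
        cases h : firstMismatch cs ss with
        | some i =>
          simp only [h] at ihss
          simp only [hfm, h, Option.map_some, cp, BEq.rfl, if_true, List.take_succ_cons,
            List.length_cons, Nat.add_lt_add_iff_right]
          rw [← apply_ite (List.cons a)]
          exact congrArg _ ihss
        | none =>
          simp only [h] at ihss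
          simp only [hfm, h, Option.map_none, cp, BEq.rfl, if_true, List.take_succ_cons,
            List.length_cons, Nat.add_lt_add_iff_right]
          rw [← apply_ite (List.cons a)]
          exact congrArg _ ihss
      · have hne : (a != b) = true := by simp [hab]
        simp [firstMismatch, hne, cp, hab]

lemma foldl_cp_nil (ps : List String) :
    ps.foldl (fun c p => cp c (splitDirs p)) [] = [] := by
  induction ps with
  | nil => rfl
  | cons p ps ih => simp [cp_nil_left, ih]

lemma aLoop_eq_foldl : ∀ (ps : List String) (c : List String),
    aLoop c ps = ps.foldl (fun c p => cp c (splitDirs p)) c := by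
  intro ps
  induction ps with
  | nil => intro c; rfl
  | cons p ps ih =>
    intro c
    show (let sp := splitDirs p
          let c1 := match firstMismatch c sp with
            | some i => List.take i c
            | none => c
          let c2 := if sp.length < c1.length then List.take sp.length c1 else c1
          if c2.length = 0 then c2 else aLoop c2 ps) = _
    simp only []
    rw [step_eq_cp c (splitDirs p)]
    by_cases h0 : (cp c (splitDirs p)).length = 0
    · have hnil : cp c (splitDirs p) = [] := List.length_eq_zero_iff.mp h0
      simp only [List.foldl_cons, hnil, foldl_cp_nil]
      simp [hnil] at h0 ⊢
    · simp only [h0, if_false, List.foldl_cons, ih]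

lemma scan_zip_nil : ∀ (first : List String), scanCols (zipCols first []) = first := by
  intro first
  induction first with
  | nil => rfl
  | cons a fs ih => simp [zipCols, scanCols, ih]

lemma scan_zip_cons : ∀ (first l : List String) (ls : List (List String)),
    scanCols (zipCols first (l :: ls)) = scanCols (zipCols (cp first l) ls) := by
  intro first
  induction first with
  | nil => intro l ls; rw [cp_nil_left]; rfl
  | cons a fs ih =>
    intro l ls
    cases l with
    | nil => simp [zipCols, cp, scanCols]
    | cons b bs =>
      by_cases hab : a = b
      · subst hab
        simp only [cp, BEq.rfl, if_true, zipCols, List.any_cons, List.isEmpty_cons,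
          Bool.false_or, List.map_cons, List.headD_cons, List.tail_cons]
        cases hemp : ls.any (·.isEmpty) with
        | true => simp
        | false =>
          simp only [Bool.false_eq_true, if_false, scanCols, List.headD_cons,
            List.any_cons, bne_self_eq_false, Bool.false_or]
          rw [ih bs (ls.map (·.tail))]
      · have hne : (b != a) = true := by simp [Ne.symm hab]
        have hcp : cp (a :: fs) (b :: bs) = [] := by simp [cp, hab]
        rw [hcp]
        simp only [zipCols, List.any_cons, List.isEmpty_cons, Bool.false_or, List.map_cons,
          List.headD_cons, List.tail_cons]
        cases hemp : ls.any (·.isEmpty) with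
        | true => simp
        | false =>
          simp only [Bool.false_eq_true, if_false, scanCols, List.headD_cons,
            List.any_cons, hne, Bool.true_or, Bool.or_true, if_true]

lemma scan_zip_foldl : ∀ (ls : List (List String)) (first : List String),
    scanCols (zipCols first ls) = ls.foldl cp first := by
  intro ls
  induction ls with
  | nil => intro first; exact scan_zip_nil first
  | cons l ls ih => intro first; rw [scan_zip_cons, ih, List.foldl_cons]

-- ===== VERDICT (by name: the statement is the Claim_ definition above) =====
theorem find_common_base_dir_spec : Claim_equal_find_common_base_dir := by
  intro paths _
  unfold Spec_find_common_base_dir find_common_base_dir find_common_base_dir_alt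
  match paths with
  | [] => rfl
  | [p] =>
    simp only [List.map_cons, List.map_nil, pyZip, scan_zip_nil]
  | p :: q :: rest =>
    simp only [List.map_cons, pyZip, scan_zip_foldl, aLoop_eq_foldl,
      List.foldl_cons, List.foldl_map]
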